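-- pv_equiv track=rewrite | github.com/Agentic-Environmental-Engineering/GymVerse | gem/gem/envs/RLVE/matrix_rmq_counting_env.py | _compute_reference_answer
-- ===== SOURCE A (Python) =====
-- from typing import Any, Optional, SupportsFloat, Tuple, List
--
-- def _compute_reference_answer(
--
--     H: int,
--     W: int,
--     M: int,
--     N: int,
--     constraints: List[tuple],
--     MOD: int
-- ) -> int:
--     """Compute the reference answer using inclusion-exclusion with coordinate compression."""
--     pos = []
--     X = [1, H + 1]
--     Y = [1, W + 1]
--
--     # Read constraints and collect coordinates for compression
--     for x1, y1, x2, y2, v in constraints: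
--         assert 1 <= x1 <= x2 <= H, "Invalid x1, x2 range"
--         assert 1 <= y1 <= y2 <= W, "Invalid y1, y2 range"
--         assert 1 <= v <= M, "Invalid value v"
--         pos.append((x1, y1, x2 + 1, y2 + 1, v))
--         X.append(x1)
--         X.append(x2 + 1)
--         Y.append(y1)
--         Y.append(y2 + 1)
--
--     # Coordinate compression
--     X = sorted(set(X))
--     Y = sorted(set(Y))
--     xi = {x: i for i, x in enumerate(X)}
--     yi = {y: i for i, y in enumerate(Y)}
--
--     # Precompute block ranges for each constraint
--     ranges = []
--     for x1, y1, x2p, y2p, v in pos: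
--         xl = xi[x1]
--         xr = xi[x2p]
--         yl = yi[y1]
--         yr = yi[y2p]
--         ranges.append((xl, xr, yl, yr, v))
--
--     # Number of blocks in compressed grid
--     Wb = len(X) - 1
--     Hb = len(Y) - 1
--
--     ans = 0
--     # Inclusion-exclusion over subsets of constraints
--     for mask in range(1 << N):
--         # Initialize each block's max allowed value to M
--         arr = [[M] * Hb for _ in range(Wb)]
--         # Apply each constraint, reducing allowed max by 1 if in the subset
--         for j in range(N):
--             bit = (mask >> j) & 1
--             xl, xr, yl, yr, v = ranges[j]
--             limit = v - bit
--             for xi_ in range(xl, xr):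
--                 row = arr[xi_]
--                 for yi_ in range(yl, yr):
--                     if row[yi_] > limit:
--                         row[yi_] = limit
--
--         # Compute number of fillings for this configuration
--         tmp = 1
--         for xi_ in range(Wb):
--             dx = X[xi_ + 1] - X[xi_]
--             for yi_ in range(Hb):
--                 dy = Y[yi_ + 1] - Y[yi_]
--                 area = dx * dy
--                 val = arr[xi_][yi_]
--                 tmp = (tmp * pow(val, area, MOD)) % MOD
--                 if tmp == 0:
--                     break
--             if tmp == 0:
--                 break
--
--         # Inclusion-exclusion sign
--         if bin(mask).count('1') & 1:
--             ans = (ans - tmp) % MOD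
--         else:
--             ans = (ans + tmp) % MOD
--
--     return ans
-- ===== SOURCE B (Python) =====
-- def _compute_reference_answer(H, W, M, N, constraints, MOD):
--     # Coordinate compression: the distinct x / y boundaries.
--     xs = {1, H + 1}
--     ys = {1, W + 1}
--     for x1, y1, x2, y2, v in constraints:
--         assert 1 <= x1 <= x2 <= H, "Invalid x1, x2 range"
--         assert 1 <= y1 <= y2 <= W, "Invalid y1, y2 range"
--         assert 1 <= v <= M, "Invalid value v"
--         xs.update((x1, x2 + 1))
--         ys.update((y1, y2 + 1))
--     X = sorted(xs)
--     Y = sorted(ys)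
--     # Precompute, once, every compressed block's area together with the list of
--     # constraint indices (among the first N) whose rectangle covers it.
--     blocks = []
--     for xa, xb in zip(X, X[1:]):
--         for ya, yb in zip(Y, Y[1:]):
--             cover = [j for j in range(N)
--                      if constraints[j][0] <= xa <= constraints[j][2]
--                      and constraints[j][1] <= ya <= constraints[j][3]]
--             blocks.append(((xb - xa) * (yb - ya), cover))
--     # Inclusion-exclusion over subsets of constraints; no grid is materialised:
--     # each block's limit is the min of M and its covering constraints' bounds.
--     ans = 0
--     for mask in range(1 << N):
--         tmp = 1
--         for area, cover in blocks:
--             limit = M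
--             for j in cover:
--                 limit = min(limit, constraints[j][4] - (mask >> j & 1))
--             tmp = tmp * pow(limit, area, MOD) % MOD
--         ans = (ans - tmp if mask.bit_count() & 1 else ans + tmp) % MOD
--     return ans
-- ===== Notes on version B (the rewrite author's own statement) =====
-- stated objective: alternative
-- what changed: Instead of painting a mutable 2D compressed grid per subset and multiplying with an early break, B precomputes once, per compressed block, its area and the list of constraint indices covering it, and per mask computes each block's limit as a min over that cover list.
import Mathlib
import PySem

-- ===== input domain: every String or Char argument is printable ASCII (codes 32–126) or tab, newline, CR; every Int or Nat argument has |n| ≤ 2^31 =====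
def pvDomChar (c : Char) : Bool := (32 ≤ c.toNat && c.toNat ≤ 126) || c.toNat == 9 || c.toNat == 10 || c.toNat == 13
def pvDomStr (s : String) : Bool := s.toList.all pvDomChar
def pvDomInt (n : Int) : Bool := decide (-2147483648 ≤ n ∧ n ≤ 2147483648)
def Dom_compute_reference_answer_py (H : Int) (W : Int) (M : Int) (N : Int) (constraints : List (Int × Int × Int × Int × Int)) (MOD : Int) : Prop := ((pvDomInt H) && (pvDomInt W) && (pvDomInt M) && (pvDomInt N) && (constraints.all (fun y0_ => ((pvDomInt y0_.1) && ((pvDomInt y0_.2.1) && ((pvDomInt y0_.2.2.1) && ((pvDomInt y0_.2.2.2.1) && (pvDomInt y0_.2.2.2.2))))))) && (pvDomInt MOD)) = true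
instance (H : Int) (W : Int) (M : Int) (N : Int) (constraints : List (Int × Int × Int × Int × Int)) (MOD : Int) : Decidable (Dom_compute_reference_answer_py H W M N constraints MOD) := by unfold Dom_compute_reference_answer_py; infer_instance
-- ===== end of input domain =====

-- B replaces A's per-subset painting of a mutable compressed 2D grid (and break-on-zero product)
-- by a one-time precomputation, per compressed block, of its area and the list of constraint
-- indices covering it; per subset each block's limit is then a min over that list (alternative, same cost class).
-- Equivalence is about the RETURN value; neither program mutates its arguments.

-- ===== PORT A =====
-- A-side helpers.  All list indices fed to `.set`/`.toNat` below are provably ≥ 0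
-- (they come from `range` bounds that are dict-of-enumerate values), so `.toNat` is exact there.
-- `row = arr[xi_]` followed by in-place writes to `row` is ported as rebuilding the row and
-- `set`-ting it back, which is observationally the same on immutable lists.

-- inner `for yi_ in range(yl, yr): if row[yi_] > limit: row[yi_] = limit`
def pyPaintRow (limit : Int) (yl yr : Int) (row : List Int) : List Int :=
  (PySem.List.pyRange yl yr).foldl
    (fun row yi_ => if PySem.List.pyGetD row yi_ 0 > limit then row.set yi_.toNat limit else row) row

-- `for xi_ in range(xl, xr): row = arr[xi_]; <inner loop>`
def pyPaint (limit xl xr yl yr : Int) (arr : List (List Int)) : List (List Int) :=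
  (PySem.List.pyRange xl xr).foldl
    (fun arr xi_ => arr.set xi_.toNat (pyPaintRow limit yl yr (PySem.List.pyGetD arr xi_ []))) arr

-- `for yi_ in range(Hb): ... if tmp == 0: break` (structural recursion = the loop with break)
def pyInnerCells (Y row : List Int) (MOD dx : Int) : List Int → Int → Int
  | [], tmp => tmp
  | yi_ :: rest, tmp =>
    let dy := PySem.List.pyGetD Y (yi_ + 1) 0 - PySem.List.pyGetD Y yi_ 0
    let area := dx * dy
    let val := PySem.List.pyGetD row yi_ 0
    let tmp' := PySem.Int.mod (tmp * PySem.Int.powMod val area.toNat MOD) MOD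
    if tmp' = 0 then tmp' else pyInnerCells Y row MOD dx rest tmp'

-- `for xi_ in range(Wb): ... if tmp == 0: break`
def pyOuterCells (X Y : List Int) (arr : List (List Int)) (MOD Hb : Int) : List Int → Int → Int
  | [], tmp => tmp
  | xi_ :: rest, tmp =>
    let dx := PySem.List.pyGetD X (xi_ + 1) 0 - PySem.List.pyGetD X xi_ 0
    let tmp' := pyInnerCells Y (PySem.List.pyGetD arr xi_ []) MOD dx (PySem.List.pyRange 0 Hb) tmp
    if tmp' = 0 then tmp' else pyOuterCells X Y arr MOD Hb rest tmp'

-- `pow(val, area, MOD)` is PySem.Int.powMod with the (provably positive) exponent as a Nat;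
-- `bin(mask).count('1')` equals `mask.bit_count()` = PySem.Int.bitCount for the nonnegative masks
-- produced by `range(1 << N)`, and is ported as such.
def compute_reference_answer_py (H : Int) (W : Int) (M : Int) (N : Int) (constraints : List (Int × Int × Int × Int × Int)) (MOD : Int) : Int :=
  let s := constraints.foldl
    (fun (s : List (Int × Int × Int × Int × Int) × List Int × List Int) c =>
      (s.1 ++ [(c.1, c.2.1, c.2.2.1 + 1, c.2.2.2.1 + 1, c.2.2.2.2)],
       s.2.1 ++ [c.1, c.2.2.1 + 1],
       s.2.2 ++ [c.2.1, c.2.2.2.1 + 1]))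
    ([], [1, H + 1], [1, W + 1])
  let X := PySem.List.sorted (PySem.Set.ofList s.2.1) (fun x => x) false
  let Y := PySem.List.sorted (PySem.Set.ofList s.2.2) (fun x => x) false
  let xi := (PySem.List.enumerate X).foldl (fun d (p : Int × Int) => d.insert p.2 p.1) PySem.Dict.empty
  let yi := (PySem.List.enumerate Y).foldl (fun d (p : Int × Int) => d.insert p.2 p.1) PySem.Dict.empty
  -- dict lookups xi[x1] … always hit (the keys were collected above): getD is exact here
  let ranges := s.1.map (fun p =>
    (xi.getD p.1 0, xi.getD p.2.2.1 0, yi.getD p.2.1 0, yi.getD p.2.2.2.1 0, p.2.2.2.2))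
  let Wb : Int := PySem.List.len X - 1
  let Hb : Int := PySem.List.len Y - 1
  (PySem.List.pyRange 0 ((1 : Int) <<< N.toNat)).foldl
    (fun ans mask =>
      let arr := (PySem.List.pyRange 0 N).foldl
        (fun arr j =>
          let bit := PySem.Int.band (mask >>> j.toNat) 1
          let r := PySem.List.pyGetD ranges j (0, 0, 0, 0, 0)
          pyPaint (r.2.2.2.2 - bit) r.1 r.2.1 r.2.2.1 r.2.2.2.1 arr)
        (List.replicate Wb.toNat (List.replicate Hb.toNat M))
      let tmp := pyOuterCells X Y arr MOD Hb (PySem.List.pyRange 0 Wb) 1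
      if PySem.Int.band ((PySem.Int.bitCount mask : Int)) 1 ≠ 0 then PySem.Int.mod (ans - tmp) MOD
      else PySem.Int.mod (ans + tmp) MOD)
    0

-- ===== PORT B =====
-- B keeps A's validating asserts (they raise outside Pre_ and have no value effect inside it,
-- so the ports, which are total, simply omit them).
-- B-side helper: `limit = M; for j in cover: limit = min(limit, constraints[j][4] - (mask >> j & 1))`
def altLimit (constraints : List (Int × Int × Int × Int × Int)) (M mask : Int) (cover : List Int) : Int :=
  cover.foldl
    (fun limit j =>
      min limit ((PySem.List.pyGetD constraints j (0, 0, 0, 0, 0)).2.2.2.2 - PySem.Int.band (mask >>> j.toNat) 1))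
    M

def compute_reference_answer_py_alt (H : Int) (W : Int) (M : Int) (N : Int) (constraints : List (Int × Int × Int × Int × Int)) (MOD : Int) : Int :=
  let s := constraints.foldl
    (fun (s : List Int × List Int) c =>
      (PySem.Set.update s.1 [c.1, c.2.2.1 + 1], PySem.Set.update s.2 [c.2.1, c.2.2.2.1 + 1]))
    (PySem.Set.ofList [1, H + 1], PySem.Set.ofList [1, W + 1])
  let X := PySem.List.sorted s.1 (fun x => x) false
  let Y := PySem.List.sorted s.2 (fun x => x) false
  let blocks := (X.zip X.tail).foldl
    (fun bs p =>
      bs ++ (Y.zip Y.tail).map (fun q =>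
        ((p.2 - p.1) * (q.2 - q.1),
         (PySem.List.pyRange 0 N).filter (fun j =>
           let c := PySem.List.pyGetD constraints j (0, 0, 0, 0, 0)
           decide (c.1 ≤ p.1 ∧ p.1 ≤ c.2.2.1 ∧ c.2.1 ≤ q.1 ∧ q.1 ≤ c.2.2.2.1)))))
    []
  (PySem.List.pyRange 0 ((1 : Int) <<< N.toNat)).foldl
    (fun ans mask =>
      let tmp := blocks.foldl
        (fun tmp b =>
          PySem.Int.mod (tmp * PySem.Int.powMod (altLimit constraints M mask b.2) b.1.toNat MOD) MOD) 1
      PySem.Int.mod (if PySem.Int.band ((PySem.Int.bitCount mask : Int)) 1 ≠ 0 then ans - tmp else ans + tmp) MOD)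
    0

-- ===== PRECONDITION & SPEC =====
-- Pre_ excludes exactly the inputs on which the Python A raises: MOD == 0 (pow/% by zero),
-- N < 0 (range/shift ValueError), N > len(constraints) (IndexError on ranges[j]), and any
-- constraint violating A's asserts (1 <= x1 <= x2 <= H, 1 <= y1 <= y2 <= W, 1 <= v <= M).
def Pre_compute_reference_answer_py (H : Int) (W : Int) (M : Int) (N : Int) (constraints : List (Int × Int × Int × Int × Int)) (MOD : Int) : Prop :=
  MOD ≠ 0 ∧ 0 ≤ N ∧ N ≤ constraints.length ∧
  ∀ c ∈ constraints,
    1 ≤ c.1 ∧ c.1 ≤ c.2.2.1 ∧ c.2.2.1 ≤ H ∧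
    1 ≤ c.2.1 ∧ c.2.1 ≤ c.2.2.2.1 ∧ c.2.2.2.1 ≤ W ∧
    1 ≤ c.2.2.2.2 ∧ c.2.2.2.2 ≤ M
instance (H : Int) (W : Int) (M : Int) (N : Int) (constraints : List (Int × Int × Int × Int × Int)) (MOD : Int) : Decidable (Pre_compute_reference_answer_py H W M N constraints MOD) := by unfold Pre_compute_reference_answer_py; infer_instance

def pvWitness_compute_reference_answer_py : Int × Int × Int × Int × (List (Int × Int × Int × Int × Int)) × Int :=
  (2, 2, 2, 1, [(1, 1, 1, 2, 2)], 97)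

def Spec_compute_reference_answer_py (H : Int) (W : Int) (M : Int) (N : Int) (constraints : List (Int × Int × Int × Int × Int)) (MOD : Int) (out : Int) : Prop := out = compute_reference_answer_py_alt H W M N constraints MOD
instance (H : Int) (W : Int) (M : Int) (N : Int) (constraints : List (Int × Int × Int × Int × Int)) (MOD : Int) (out : Int) : Decidable (Spec_compute_reference_answer_py H W M N constraints MOD out) := by unfold Spec_compute_reference_answer_py; infer_instance

-- ===== CLAIM (what is proved, stated in full; the proofs are below) =====
def Claim_equal_compute_reference_answer_py : Prop := ∀ (H : Int) (W : Int) (M : Int) (N : Int) (constraints : List (Int × Int × Int × Int × Int)) (MOD : Int), Dom_compute_reference_answer_py H W M N constraints MOD → Pre_compute_reference_answer_py H W M N constraints MOD → Spec_compute_reference_answer_py H W M N constraints MOD (compute_reference_answer_py H W M N constraints MOD)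

-- ===== LEMMAS AND PROOFS =====

theorem pv_mod_zero (m : Int) : PySem.Int.mod 0 m = 0 := by simp [PySem.Int.mod]

theorem pv_foldZero {α : Type} (MOD : Int) (f : α → Int) (L : List α) :
    L.foldl (fun t y => PySem.Int.mod (t * f y) MOD) 0 = 0 := by
  induction L with
  | nil => rfl
  | cons y L ih => simpa [pv_mod_zero] using ih

theorem pv_foldZero2 {α β : Type} (MOD : Int) (g : α → β → Int) (K : α → List β) (L : List α) :
    L.foldl (fun t x => (K x).foldl (fun t y => PySem.Int.mod (t * g x y) MOD) t) 0 = 0 := by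
  induction L with
  | nil => rfl
  | cons x L ih => rw [List.foldl_cons, pv_foldZero]; exact ih

theorem pv_inner_eq (Y row : List Int) (MOD dx : Int) (L : List Int) (tmp : Int) :
    pyInnerCells Y row MOD dx L tmp =
      L.foldl (fun t y => PySem.Int.mod (t * PySem.Int.powMod (PySem.List.pyGetD row y 0)
        ((dx * (PySem.List.pyGetD Y (y + 1) 0 - PySem.List.pyGetD Y y 0)).toNat) MOD) MOD) tmp := by
  induction L generalizing tmp with
  | nil => rfl
  | cons y L ih =>
    rw [pyInnerCells, List.foldl_cons]
    split_ifs with h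
    · rw [h, pv_foldZero]
    · exact ih _

theorem pv_outer_eq (X Y : List Int) (arr : List (List Int)) (MOD Hb : Int) (L : List Int) (tmp : Int) :
    pyOuterCells X Y arr MOD Hb L tmp =
      L.foldl (fun t x =>
        (PySem.List.pyRange 0 Hb).foldl (fun t y =>
          PySem.Int.mod (t * PySem.Int.powMod (PySem.List.pyGetD (PySem.List.pyGetD arr x []) y 0)
            (((PySem.List.pyGetD X (x + 1) 0 - PySem.List.pyGetD X x 0) *
              (PySem.List.pyGetD Y (y + 1) 0 - PySem.List.pyGetD Y y 0)).toNat) MOD) MOD) t) tmp := by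
  induction L generalizing tmp with
  | nil => rfl
  | cons x L ih =>
    rw [pyOuterCells, List.foldl_cons, pv_inner_eq]
    split_ifs with h
    · rw [h, pv_foldZero2]
    · exact ih _

theorem pv_rowfold_len (limit : Int) (L : List Int) (row : List Int) :
    (L.foldl (fun row y => if PySem.List.pyGetD row y 0 > limit then row.set y.toNat limit else row) row).length
      = row.length := by
  induction L generalizing row with
  | nil => rfl
  | cons y L ih =>
    rw [List.foldl_cons, ih]
    split_ifs <;> simp

theorem pv_paintRow_len (limit yl yr : Int) (row : List Int) :
    (pyPaintRow limit yl yr row).length = row.length := pv_rowfold_len _ _ _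

theorem pv_rowfold_getD (limit : Int) (L : List Int) (hL : ∀ y ∈ L, 0 ≤ y) (row : List Int)
    (k : Nat) (hk : k < row.length) :
    (L.foldl (fun row y => if PySem.List.pyGetD row y 0 > limit then row.set y.toNat limit else row) row).getD k 0 =
      if (k : Int) ∈ L then min (row.getD k 0) limit else row.getD k 0 := by
  induction L generalizing row with
  | nil => simp
  | cons y L ih =>
    have hy : 0 ≤ y := hL y (by simp)
    rw [List.foldl_cons]
    set row' := (if PySem.List.pyGetD row y 0 > limit then row.set y.toNat limit else row) with hrow'
    have hlen : row'.length = row.length := by rw [hrow']; split_ifs <;> simp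
    have hgd : row'.getD k 0 = if (k : Int) = y then min (row.getD k 0) limit else row.getD k 0 := by
      by_cases hky : (k : Int) = y
      · rw [if_pos hky]
        have hyk : y.toNat = k := by omega
        have hpg : PySem.List.pyGetD row y 0 = row.getD k 0 := by
          rw [PySem.List.pyGetD_of_nonneg row 0 hy, hyk]
        rw [hrow', hpg]
        split_ifs with hgt
        · rw [hyk, List.getD_eq_getElem?_getD, List.getElem?_set]
          simp [hk]
          rw [List.getD_eq_getElem _ 0 hk] at hgt
          omega
        · rw [min_eq_left (by omega)]
      · have hne : y.toNat ≠ k := by omega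
        rw [hrow', if_neg hky]
        split_ifs with hgt
        · simp [List.getD_eq_getElem?_getD, hne]
        · rfl
    rw [ih (fun z hz => hL z (List.mem_cons_of_mem _ hz)) row' (hlen ▸ hk), hgd]
    by_cases h1 : (k : Int) = y <;> by_cases h2 : (k : Int) ∈ L <;>
      simp [h1, h2]

theorem pv_paintRow_getD (limit yl yr : Int) (hyl : 0 ≤ yl) (row : List Int) (k : Nat) (hk : k < row.length) :
    (pyPaintRow limit yl yr row).getD k 0 =
      if yl ≤ (k : Int) ∧ (k : Int) < yr then min (row.getD k 0) limit else row.getD k 0 := by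
  rw [pyPaintRow, pv_rowfold_getD _ _
    (fun y hy => by have := PySem.List.mem_pyRange_one.mp hy; omega) _ _ hk]
  simp [PySem.List.mem_pyRange_one]

theorem pv_paintRow_idem (limit yl yr : Int) (hyl : 0 ≤ yl) (row : List Int) :
    pyPaintRow limit yl yr (pyPaintRow limit yl yr row) = pyPaintRow limit yl yr row := by
  apply List.ext_getElem (by rw [pv_paintRow_len, pv_paintRow_len])
  intro i h1 h2
  have hl1 := pv_paintRow_len limit yl yr row
  have hl2 := pv_paintRow_len limit yl yr (pyPaintRow limit yl yr row)
  have hi : i < row.length := by omega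
  have hi2 : i < (pyPaintRow limit yl yr row).length := by omega
  rw [← List.getD_eq_getElem _ 0 h1, ← List.getD_eq_getElem _ 0 h2,
    pv_paintRow_getD limit yl yr hyl _ i hi2, pv_paintRow_getD limit yl yr hyl _ i hi]
  split_ifs <;> simp

theorem pv_arrfold_len (limit yl yr : Int) (L : List Int) (arr : List (List Int)) :
    (L.foldl (fun arr x => arr.set x.toNat (pyPaintRow limit yl yr (PySem.List.pyGetD arr x []))) arr).length
      = arr.length := by
  induction L generalizing arr with
  | nil => rfl
  | cons x L ih => rw [List.foldl_cons, ih]; simp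

theorem pv_paint_len (limit xl xr yl yr : Int) (arr : List (List Int)) :
    (pyPaint limit xl xr yl yr arr).length = arr.length := pv_arrfold_len _ _ _ _ _

theorem pv_arrfold_getD (limit yl yr : Int) (hyl : 0 ≤ yl) (L : List Int) (hL : ∀ x ∈ L, 0 ≤ x)
    (arr : List (List Int)) (i : Nat) (hi : i < arr.length) :
    (L.foldl (fun arr x => arr.set x.toNat (pyPaintRow limit yl yr (PySem.List.pyGetD arr x []))) arr).getD i [] =
      if (i : Int) ∈ L then pyPaintRow limit yl yr (arr.getD i []) else arr.getD i [] := by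
  induction L generalizing arr with
  | nil => simp
  | cons x L ih =>
    have hx : 0 ≤ x := hL x (by simp)
    rw [List.foldl_cons]
    set arr' := arr.set x.toNat (pyPaintRow limit yl yr (PySem.List.pyGetD arr x [])) with harr'
    have hlen : arr'.length = arr.length := by simp [harr']
    have hgd : arr'.getD i [] =
        if (i : Int) = x then pyPaintRow limit yl yr (arr.getD i []) else arr.getD i [] := by
      by_cases hix : (i : Int) = x
      · rw [if_pos hix]
        have hxi : x.toNat = i := by omega
        have hpg : PySem.List.pyGetD arr x [] = arr.getD i [] := by
          rw [PySem.List.pyGetD_of_nonneg arr [] hx, hxi]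
        rw [harr', hpg, hxi, List.getD_eq_getElem?_getD, List.getElem?_set]
        simp [hi]
      · have hne : x.toNat ≠ i := by omega
        rw [if_neg hix, harr', List.getD_eq_getElem?_getD, List.getElem?_set, if_neg hne,
          ← List.getD_eq_getElem?_getD]
    rw [ih (fun z hz => hL z (List.mem_cons_of_mem _ hz)) arr' (hlen ▸ hi), hgd]
    by_cases h1 : (i : Int) = x <;> by_cases h2 : (i : Int) ∈ L <;>
      simp [h1, h2, pv_paintRow_idem limit yl yr hyl]

theorem pv_paint_getD (limit xl xr yl yr : Int) (hxl : 0 ≤ xl) (hyl : 0 ≤ yl)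
    (arr : List (List Int)) (i k : Nat) (hi : i < arr.length) (hk : k < (arr.getD i []).length) :
    ((pyPaint limit xl xr yl yr arr).getD i []).getD k 0 =
      if xl ≤ (i : Int) ∧ (i : Int) < xr ∧ yl ≤ (k : Int) ∧ (k : Int) < yr
      then min ((arr.getD i []).getD k 0) limit else (arr.getD i []).getD k 0 := by
  rw [pyPaint, pv_arrfold_getD limit yl yr hyl _
    (fun x hx => by have := PySem.List.mem_pyRange_one.mp hx; omega) arr i hi]
  by_cases hmem : (i : Int) ∈ PySem.List.pyRange xl xr
  · rw [if_pos hmem, pv_paintRow_getD limit yl yr hyl _ k hk]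
    have := PySem.List.mem_pyRange_one.mp hmem
    by_cases hky : yl ≤ (k : Int) ∧ (k : Int) < yr
    · rw [if_pos hky, if_pos ⟨this.1, this.2, hky.1, hky.2⟩]
    · rw [if_neg hky, if_neg (by tauto)]
  · rw [if_neg hmem]
    rw [PySem.List.mem_pyRange_one] at hmem
    rw [if_neg (by tauto)]

-- dims invariant for the per-mask paint fold
def pvDims (arr : List (List Int)) (Wn Hn : Nat) : Prop :=
  arr.length = Wn ∧ ∀ i : Nat, i < Wn → (arr.getD i []).length = Hn

theorem pv_paint_dims (limit xl xr yl yr : Int) (hxl : 0 ≤ xl) (hyl : 0 ≤ yl)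
    (arr : List (List Int)) (Wn Hn : Nat) (h : pvDims arr Wn Hn) :
    pvDims (pyPaint limit xl xr yl yr arr) Wn Hn := by
  refine ⟨by rw [pv_paint_len, h.1], fun i hi => ?_⟩
  rw [pyPaint, pv_arrfold_getD limit yl yr hyl _
    (fun x hx => by have := PySem.List.mem_pyRange_one.mp hx; omega) arr i (by rw [h.1]; exact hi)]
  split_ifs
  · rw [pv_paintRow_len]; exact h.2 i hi
  · exact h.2 i hi

theorem pv_jfold (lim xlf xrf ylf yrf : Int → Int) (L : List Int)
    (hL : ∀ j ∈ L, 0 ≤ xlf j ∧ 0 ≤ ylf j)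
    (Wn Hn : Nat) (arr : List (List Int)) (hdims : pvDims arr Wn Hn)
    (i k : Nat) (hi : i < Wn) (hk : k < Hn) :
    ((L.foldl (fun arr j => pyPaint (lim j) (xlf j) (xrf j) (ylf j) (yrf j) arr) arr).getD i []).getD k 0 =
      L.foldl (fun a j => if xlf j ≤ (i : Int) ∧ (i : Int) < xrf j ∧ ylf j ≤ (k : Int) ∧ (k : Int) < yrf j
        then min a (lim j) else a) ((arr.getD i []).getD k 0) := by
  induction L generalizing arr with
  | nil => rfl
  | cons j L ih =>
    obtain ⟨hxl, hyl⟩ := hL j (by simp)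
    rw [List.foldl_cons, List.foldl_cons,
      ih (fun z hz => hL z (List.mem_cons_of_mem _ hz)) _ (pv_paint_dims _ _ _ _ _ hxl hyl _ _ _ hdims)]
    congr 1
    rw [pv_paint_getD _ _ _ _ _ hxl hyl arr i k (by rw [hdims.1]; exact hi)
      (by rw [hdims.2 i hi]; exact hk)]

theorem pv_dict_fold_notmem (pairs : List (Int × Int)) (d : PySem.Dict Int Int) (x : Int)
    (hx : ∀ p ∈ pairs, p.2 ≠ x) :
    (pairs.foldl (fun d (p : Int × Int) => d.insert p.2 p.1) d).getD x 0 = d.getD x 0 := by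
  induction pairs generalizing d with
  | nil => rfl
  | cons p ps ih =>
    rw [List.foldl_cons, ih _ (fun q hq => hx q (List.mem_cons_of_mem _ hq)),
      PySem.Dict.getD_insert_of_ne _ _ _ (Ne.symm (hx p (by simp)))]

theorem pv_dict_enum_getD (X : List Int) (hnd : X.Nodup) (k : Nat) (hk : k < X.length)
    (s : Int) (d : PySem.Dict Int Int) :
    ((PySem.List.enumerate X s).foldl (fun d (p : Int × Int) => d.insert p.2 p.1) d).getD X[k] 0 = s + k := by
  induction X generalizing s d k with
  | nil => simp at hk
  | cons x X ih =>
    rw [PySem.List.enumerate_cons, List.foldl_cons]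
    cases k with
    | zero =>
      have hmem : ∀ p ∈ PySem.List.enumerate X (s + 1), (p : Int × Int).2 ≠ (x :: X)[0] := by
        intro p hp h
        have h2 : p.2 ∈ X := by
          rw [← PySem.List.map_snd_enumerate X (s + 1)]
          exact List.mem_map_of_mem hp
        rw [List.getElem_cons_zero] at h
        exact (List.nodup_cons.mp hnd).1 (h ▸ h2)
      rw [pv_dict_fold_notmem _ _ _ hmem, List.getElem_cons_zero, PySem.Dict.getD_insert_self]
      simp
    | succ k =>
      rw [List.getElem_cons_succ, ih (List.nodup_cons.mp hnd).2 k (by simpa using hk) (s + 1) _]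
      push_cast
      ring

theorem pv_sorted_le_iff (X : List Int) (hs : X.Pairwise (· < ·)) {p i : Nat}
    (hp : p < X.length) (hi : i < X.length) : p ≤ i ↔ X[p] ≤ X[i] := by
  constructor
  · intro h
    rcases Nat.eq_or_lt_of_le h with rfl | h'
    · exact le_refl _
    · exact le_of_lt (List.pairwise_iff_getElem.mp hs _ _ hp hi h')
  · intro h
    by_contra hc
    have := List.pairwise_iff_getElem.mp hs _ _ hi hp (by omega)
    omega

theorem pv_sorted_lt_iff (X : List Int) (hs : X.Pairwise (· < ·)) {p i : Nat}
    (hp : p < X.length) (hi : i < X.length) : i < p ↔ X[i] < X[p] := by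
  rw [← Nat.not_le, pv_sorted_le_iff X hs hp hi, not_le]

theorem pv_zip_tail (X : List Int) :
    X.zip X.tail = (List.range (X.length - 1)).map (fun i => (X.getD i 0, X.getD (i + 1) 0)) := by
  apply List.ext_getElem (by simp [List.length_zip, List.length_tail])
  intro i h1 h2
  have hlen : i < X.length - 1 := by simp [List.length_zip, List.length_tail] at h1; omega
  have hi : i < X.length := by omega
  have hi1 : i + 1 < X.length := by omega
  rw [List.getElem_zip, List.getElem_map, List.getElem_range, List.getElem_tail,
    List.getD_eq_getElem _ _ hi, List.getD_eq_getElem _ _ hi1]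

theorem pv_triple_fold (cs : List (Int × Int × Int × Int × Int))
    (P0 : List (Int × Int × Int × Int × Int)) (X0 Y0 : List Int) :
    cs.foldl (fun (s : List (Int × Int × Int × Int × Int) × List Int × List Int) c =>
        (s.1 ++ [(c.1, c.2.1, c.2.2.1 + 1, c.2.2.2.1 + 1, c.2.2.2.2)],
         s.2.1 ++ [c.1, c.2.2.1 + 1],
         s.2.2 ++ [c.2.1, c.2.2.2.1 + 1])) (P0, X0, Y0)
      = (P0 ++ cs.map (fun c => (c.1, c.2.1, c.2.2.1 + 1, c.2.2.2.1 + 1, c.2.2.2.2)),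
         X0 ++ cs.flatMap (fun c => [c.1, c.2.2.1 + 1]),
         Y0 ++ cs.flatMap (fun c => [c.2.1, c.2.2.2.1 + 1])) := by
  induction cs generalizing P0 X0 Y0 with
  | nil => simp
  | cons c cs ih => simp [ih]

theorem pv_pair_fold (cs : List (Int × Int × Int × Int × Int)) (sx sy : List Int) :
    cs.foldl (fun (s : List Int × List Int) c =>
        (PySem.Set.update s.1 [c.1, c.2.2.1 + 1], PySem.Set.update s.2 [c.2.1, c.2.2.2.1 + 1])) (sx, sy)
      = ((cs.flatMap (fun c => [c.1, c.2.2.1 + 1])).foldl PySem.Set.add sx,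
         (cs.flatMap (fun c => [c.2.1, c.2.2.2.1 + 1])).foldl PySem.Set.add sy) := by
  induction cs generalizing sx sy with
  | nil => simp
  | cons c cs ih =>
    rw [List.foldl_cons, ih]
    simp [PySem.Set.update]

theorem pv_set_eq (X0 F : List Int) :
    PySem.Set.ofList (X0 ++ F) = F.foldl PySem.Set.add (PySem.Set.ofList X0) := by
  rw [PySem.Set.ofList_eq_foldl, List.foldl_append, ← PySem.Set.ofList_eq_foldl]

theorem pv_ports_eq (H W M N : Int) (constraints : List (Int × Int × Int × Int × Int)) (MOD : Int)
    (hNlen : N ≤ (constraints.length : Int)) :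
    compute_reference_answer_py H W M N constraints MOD =
      compute_reference_answer_py_alt H W M N constraints MOD := by
  rw [compute_reference_answer_py, compute_reference_answer_py_alt]
  simp only [pv_triple_fold, pv_pair_fold, ← pv_set_eq, List.nil_append]
  set X := PySem.List.sorted (PySem.Set.ofList ([1, H + 1] ++ List.flatMap (fun c => [c.1, c.2.2.1 + 1]) constraints)) (fun x => x) with hXdef
  set Y := PySem.List.sorted (PySem.Set.ofList ([1, W + 1] ++ List.flatMap (fun c => [c.2.1, c.2.2.2.1 + 1]) constraints)) (fun x => x) with hYdef
  set xi : PySem.Dict Int Int := List.foldl (fun d p => d.insert p.2 p.1) PySem.Dict.empty (PySem.List.enumerate X) with hxidef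
  set yi : PySem.Dict Int Int := List.foldl (fun d p => d.insert p.2 p.1) PySem.Dict.empty (PySem.List.enumerate Y) with hyidef
  set ranges := List.map (fun p => (xi.getD p.1 0, xi.getD p.2.2.1 0, yi.getD p.2.1 0, yi.getD p.2.2.2.1 0, p.2.2.2.2)) (List.map (fun c => (c.1, c.2.1, c.2.2.1 + 1, c.2.2.2.1 + 1, c.2.2.2.2)) constraints) with hrangesdef
  -- shared facts about the compressed coordinate lists
  have hXsort : X.Pairwise (· < ·) := by rw [hXdef]; exact PySem.List.sorted_ofList_pairwise_lt _
  have hYsort : Y.Pairwise (· < ·) := by rw [hYdef]; exact PySem.List.sorted_ofList_pairwise_lt _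
  have hXnd : X.Nodup := by
    rw [hXdef]; exact ((PySem.List.sorted_perm _ _ _).nodup_iff).mpr (PySem.Set.nodup_ofList _)
  have hYnd : Y.Nodup := by
    rw [hYdef]; exact ((PySem.List.sorted_perm _ _ _).nodup_iff).mpr (PySem.Set.nodup_ofList _)
  have hXmem : ∀ z : Int, z ∈ X ↔ z ∈ ([1, H + 1] ++ List.flatMap (fun c => [c.1, c.2.2.1 + 1]) constraints) := by
    intro z; rw [hXdef, PySem.List.mem_sorted, PySem.Set.mem_ofList]
  have hYmem : ∀ z : Int, z ∈ Y ↔ z ∈ ([1, W + 1] ++ List.flatMap (fun c => [c.2.1, c.2.2.2.1 + 1]) constraints) := by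
    intro z; rw [hYdef, PySem.List.mem_sorted, PySem.Set.mem_ofList]
  have hXlen : 1 ≤ X.length :=
    List.length_pos_iff.mpr (List.ne_nil_of_mem ((hXmem 1).mpr (by simp)))
  have hYlen : 1 ≤ Y.length :=
    List.length_pos_iff.mpr (List.ne_nil_of_mem ((hYmem 1).mpr (by simp)))
  have hxiget : ∀ z : Int, z ∈ X → ∃ p : Nat, p < X.length ∧ X.getD p 0 = z ∧ xi.getD z 0 = (p : Int) := by
    intro z hz
    obtain ⟨p, hp, hzp⟩ := List.getElem_of_mem hz
    refine ⟨p, hp, by rw [List.getD_eq_getElem _ _ hp, hzp], ?_⟩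
    rw [hxidef, ← hzp]
    simpa using pv_dict_enum_getD X hXnd p hp 0 PySem.Dict.empty
  have hyiget : ∀ z : Int, z ∈ Y → ∃ p : Nat, p < Y.length ∧ Y.getD p 0 = z ∧ yi.getD z 0 = (p : Int) := by
    intro z hz
    obtain ⟨p, hp, hzp⟩ := List.getElem_of_mem hz
    refine ⟨p, hp, by rw [List.getD_eq_getElem _ _ hp, hzp], ?_⟩
    rw [hyidef, ← hzp]
    simpa using pv_dict_enum_getD Y hYnd p hp 0 PySem.Dict.empty
  have hrlen : ranges.length = constraints.length := by rw [hrangesdef]; simp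
  -- per-constraint characterisation of ranges[j]
  have hchar : ∀ j : Int, 0 ≤ j → j < N →
      ∃ (c : Int × Int × Int × Int × Int) (p q py qy : Nat),
        PySem.List.pyGetD constraints j (0, 0, 0, 0, 0) = c ∧
        p < X.length ∧ q < X.length ∧ py < Y.length ∧ qy < Y.length ∧
        X.getD p 0 = c.1 ∧ X.getD q 0 = c.2.2.1 + 1 ∧
        Y.getD py 0 = c.2.1 ∧ Y.getD qy 0 = c.2.2.2.1 + 1 ∧
        PySem.List.pyGetD ranges j (0, 0, 0, 0, 0) = ((p : Int), (q : Int), (py : Int), (qy : Int), c.2.2.2.2) := by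
    intro j hj0 hjN
    have hjlen : j < (constraints.length : Int) := lt_of_lt_of_le hjN hNlen
    have hc : PySem.List.pyGetD constraints j (0, 0, 0, 0, 0) = constraints[j.toNat]'(by omega) :=
      PySem.List.pyGetD_eq_getElem _ _ hj0 hjlen
    have hcmem : constraints[j.toNat]'(by omega) ∈ constraints := List.getElem_mem _
    have hm1 : (constraints[j.toNat]'(by omega)).1 ∈ X := (hXmem _).mpr (by
      simp only [List.mem_append, List.mem_flatMap]
      exact Or.inr ⟨_, hcmem, by simp⟩)
    have hm2 : (constraints[j.toNat]'(by omega)).2.2.1 + 1 ∈ X := (hXmem _).mpr (by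
      simp only [List.mem_append, List.mem_flatMap]
      exact Or.inr ⟨_, hcmem, by simp⟩)
    have hm3 : (constraints[j.toNat]'(by omega)).2.1 ∈ Y := (hYmem _).mpr (by
      simp only [List.mem_append, List.mem_flatMap]
      exact Or.inr ⟨_, hcmem, by simp⟩)
    have hm4 : (constraints[j.toNat]'(by omega)).2.2.2.1 + 1 ∈ Y := (hYmem _).mpr (by
      simp only [List.mem_append, List.mem_flatMap]
      exact Or.inr ⟨_, hcmem, by simp⟩)
    obtain ⟨p, hp, hXp, hxip⟩ := hxiget _ hm1
    obtain ⟨q, hq, hXq, hxiq⟩ := hxiget _ hm2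
    obtain ⟨py, hpy, hYpy, hyipy⟩ := hyiget _ hm3
    obtain ⟨qy, hqy, hYqy, hyiqy⟩ := hyiget _ hm4
    refine ⟨_, p, q, py, qy, hc, hp, hq, hpy, hqy, hXp, hXq, hYpy, hYqy, ?_⟩
    have hr : PySem.List.pyGetD ranges j (0, 0, 0, 0, 0) = ranges[j.toNat]'(by omega) :=
      PySem.List.pyGetD_eq_getElem _ _ hj0 (by rw [hrlen]; exact hjlen)
    rw [hr]
    simp only [hrangesdef, List.getElem_map]
    rw [hxip, hxiq, hyipy, hyiqy]
  have hlenX : PySem.List.len X - 1 = ((X.length - 1 : Nat) : Int) := by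
    simp only [PySem.List.len_eq]; omega
  have hlenY : PySem.List.len Y - 1 = ((Y.length - 1 : Nat) : Int) := by
    simp only [PySem.List.len_eq]; omega
  -- the per-mask product computed by A equals the per-mask product computed by B
  have key : ∀ mask : Int,
      pyOuterCells X Y
        (List.foldl
          (fun arr j =>
            pyPaint ((PySem.List.pyGetD ranges j (0, 0, 0, 0, 0)).2.2.2.2 - PySem.Int.band (mask >>> j.toNat) 1)
              (PySem.List.pyGetD ranges j (0, 0, 0, 0, 0)).1 (PySem.List.pyGetD ranges j (0, 0, 0, 0, 0)).2.1
              (PySem.List.pyGetD ranges j (0, 0, 0, 0, 0)).2.2.1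
              (PySem.List.pyGetD ranges j (0, 0, 0, 0, 0)).2.2.2.1 arr)
          (List.replicate (PySem.List.len X - 1).toNat (List.replicate (PySem.List.len Y - 1).toNat M))
          (PySem.List.pyRange 0 N))
        MOD (PySem.List.len Y - 1) (PySem.List.pyRange 0 (PySem.List.len X - 1)) 1 =
      List.foldl
        (fun tmp b =>
          PySem.Int.mod (tmp * PySem.Int.powMod (altLimit constraints M mask b.2) b.1.toNat MOD) MOD) 1
        (List.foldl
          (fun bs p =>
            bs ++
              List.map
                (fun q =>
                  ((p.2 - p.1) * (q.2 - q.1),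
                    List.filter
                      (fun j =>
                        decide
                          ((PySem.List.pyGetD constraints j (0, 0, 0, 0, 0)).1 ≤ p.1 ∧
                            p.1 ≤ (PySem.List.pyGetD constraints j (0, 0, 0, 0, 0)).2.2.1 ∧
                              (PySem.List.pyGetD constraints j (0, 0, 0, 0, 0)).2.1 ≤ q.1 ∧
                                q.1 ≤ (PySem.List.pyGetD constraints j (0, 0, 0, 0, 0)).2.2.2.1))
                      (PySem.List.pyRange 0 N)))
                (Y.zip Y.tail))
          [] (X.zip X.tail)) := by
    intro mask
    rw [pv_outer_eq, PySem.List.foldl_append_eq_flatMap, List.nil_append, List.foldl_flatMap]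
    simp only [List.foldl_map]
    rw [pv_zip_tail X, pv_zip_tail Y]
    simp only [List.foldl_map]
    rw [hlenX, hlenY]
    simp only [PySem.List.pyRange_zero_nat, List.foldl_map, Int.toNat_natCast]
    apply PySem.List.foldl_congr_mem
    intro t i hi
    apply PySem.List.foldl_congr_mem
    intro t' k hk
    have hi' : i < X.length - 1 := List.mem_range.mp hi
    have hk' : k < Y.length - 1 := List.mem_range.mp hk
    have hiX : i < X.length := by omega
    have hkY : k < Y.length := by omega
    have hcastI : ((i : Int) + 1) = ((i + 1 : Nat) : Int) := by push_cast; ring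
    have hcastK : ((k : Int) + 1) = ((k + 1 : Nat) : Int) := by push_cast; ring
    simp only [hcastI, hcastK, PySem.List.pyGetD_natCast]
    refine congrArg (fun v => PySem.Int.mod (t' * PySem.Int.powMod v
      (((X.getD (i + 1) 0 - X.getD i 0) * (Y.getD (k + 1) 0 - Y.getD k 0)).toNat) MOD) MOD) ?_
    have hdims0 : pvDims (List.replicate (X.length - 1) (List.replicate (Y.length - 1) M))
        (X.length - 1) (Y.length - 1) := by
      refine ⟨by simp, fun i2 hi2 => ?_⟩
      rw [List.getD_eq_getElem _ _ (by simpa using hi2), List.getElem_replicate]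
      simp
    have hjmem : ∀ j ∈ PySem.List.pyRange 0 N,
        0 ≤ (PySem.List.pyGetD ranges j (0, 0, 0, 0, 0)).1 ∧
        0 ≤ (PySem.List.pyGetD ranges j (0, 0, 0, 0, 0)).2.2.1 := by
      intro j hj
      obtain ⟨hj0, hjN⟩ := PySem.List.mem_pyRange_one.mp hj
      obtain ⟨c, p, q, py, qy, hc, hp, hq, hpy, hqy, hXp, hXq, hYpy, hYqy, hr⟩ := hchar j hj0 hjN
      rw [hr]
      exact ⟨Int.natCast_nonneg p, Int.natCast_nonneg py⟩
    have hval := pv_jfold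
      (fun j => (PySem.List.pyGetD ranges j (0, 0, 0, 0, 0)).2.2.2.2 - PySem.Int.band (mask >>> j.toNat) 1)
      (fun j => (PySem.List.pyGetD ranges j (0, 0, 0, 0, 0)).1)
      (fun j => (PySem.List.pyGetD ranges j (0, 0, 0, 0, 0)).2.1)
      (fun j => (PySem.List.pyGetD ranges j (0, 0, 0, 0, 0)).2.2.1)
      (fun j => (PySem.List.pyGetD ranges j (0, 0, 0, 0, 0)).2.2.2.1)
      (PySem.List.pyRange 0 N) hjmem (X.length - 1) (Y.length - 1) _ hdims0 i k hi' hk'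
    beta_reduce at hval
    have hM : ((List.replicate (X.length - 1) (List.replicate (Y.length - 1) M)).getD i []).getD k 0 = M := by
      have h1 : (List.replicate (X.length - 1) (List.replicate (Y.length - 1) M)).getD i [] =
          List.replicate (Y.length - 1) M := by
        rw [List.getD_eq_getElem _ _ (by simpa using hi'), List.getElem_replicate]
      rw [h1, List.getD_eq_getElem _ _ (by simpa using hk'), List.getElem_replicate]
    rw [hM] at hval
    rw [hval, altLimit, List.foldl_filter]
    apply PySem.List.foldl_congr_mem
    intro a j hj
    obtain ⟨hj0, hjN⟩ := PySem.List.mem_pyRange_one.mp hj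
    obtain ⟨c, p, q, py, qy, hc, hp, hq, hpy, hqy, hXp, hXq, hYpy, hYqy, hr⟩ := hchar j hj0 hjN
    simp only [hr, hc, decide_eq_true_eq]
    have e1 : ((p : Int) ≤ (i : Int)) ↔ (c.1 ≤ X.getD i 0) := by
      rw [Nat.cast_le, pv_sorted_le_iff X hXsort hp hiX,
        ← List.getD_eq_getElem X 0 hp, ← List.getD_eq_getElem X 0 hiX, hXp]
    have e2 : ((i : Int) < (q : Int)) ↔ (X.getD i 0 ≤ c.2.2.1) := by
      rw [Nat.cast_lt, pv_sorted_lt_iff X hXsort hq hiX,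
        ← List.getD_eq_getElem X 0 hiX, ← List.getD_eq_getElem X 0 hq, hXq]
      exact Int.lt_add_one_iff
    have e3 : ((py : Int) ≤ (k : Int)) ↔ (c.2.1 ≤ Y.getD k 0) := by
      rw [Nat.cast_le, pv_sorted_le_iff Y hYsort hpy hkY,
        ← List.getD_eq_getElem Y 0 hpy, ← List.getD_eq_getElem Y 0 hkY, hYpy]
    have e4 : ((k : Int) < (qy : Int)) ↔ (Y.getD k 0 ≤ c.2.2.2.1) := by
      rw [Nat.cast_lt, pv_sorted_lt_iff Y hYsort hqy hkY,
        ← List.getD_eq_getElem Y 0 hkY, ← List.getD_eq_getElem Y 0 hqy, hYqy]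
      exact Int.lt_add_one_iff
    simp only [e1, e2, e3, e4]
  simp only [key]
  apply PySem.List.foldl_congr_mem
  intro acc mask _
  rw [apply_ite (fun z => PySem.Int.mod z MOD)]

-- ===== VERDICT (by name: the statement is the Claim_ definition above) =====
theorem compute_reference_answer_py_spec : Claim_equal_compute_reference_answer_py := by
  intro H W M N constraints MOD _ hpre
  unfold Spec_compute_reference_answer_py
  exact pv_ports_eq H W M N constraints MOD hpre.2.2.1
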